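-- pv_equiv track=rewrite | github.com/shanu13/5-Sem | cloud/New folder/Assignment1.py | getRepeatingElement
-- ===== SOURCE A (Python) =====
-- from typing import List
--
-- def getRepeatingElement(numList: List[int]) -> set():  # Problem 7
--     """Returns the first repeating element from the given list numList.
--
--     doctests:
--     >>> getRepeatingElement([1, 2, 3, 4, 5, 1, 2])
--     {1}
--     >>> getRepeatingElement([1, 2, 5, 4, 5, 1])
--     {5}
--     """
--     min = 10000000
--     repeatingSet = set([0])
--     for i in range(len(numList)):
--         for j in range(i + 1, len(numList)):
--             if numList[i] == numList[j]:
--                 if j - i < min: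
--                     repeatingSet.pop()
--                     min = j - i
--                     repeatingSet.add(numList[i])
--
--     return repeatingSet
-- ===== SOURCE B (Python) =====
-- def getRepeatingElement(numList):
--     INF = 10000000
--     bestGap = INF
--     best = 0
--     lastSeen = {}
--     for j, v in enumerate(numList):
--         if v in lastSeen:
--             gap = j - lastSeen[v]
--             if gap < bestGap:
--                 bestGap = gap
--                 best = v
--         lastSeen[v] = j
--     return {best}
-- ===== Notes on version B (the rewrite author's own statement) =====
-- stated objective: faster
-- what changed: Replaces the O(n^2) all-pairs double loop with a single pass keeping a dict of each value's last-seen index and tracking the minimal gap.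
import Mathlib
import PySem

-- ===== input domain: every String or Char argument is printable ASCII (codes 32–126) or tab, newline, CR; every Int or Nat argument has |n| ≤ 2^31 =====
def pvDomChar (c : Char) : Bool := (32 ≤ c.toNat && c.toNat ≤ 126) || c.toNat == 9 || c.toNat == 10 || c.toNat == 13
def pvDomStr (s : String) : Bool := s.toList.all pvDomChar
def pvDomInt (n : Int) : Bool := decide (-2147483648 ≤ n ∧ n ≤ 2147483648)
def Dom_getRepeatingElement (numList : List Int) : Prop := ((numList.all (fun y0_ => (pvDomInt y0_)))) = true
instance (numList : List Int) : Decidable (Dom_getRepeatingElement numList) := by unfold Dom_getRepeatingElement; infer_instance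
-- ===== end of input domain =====

-- B replaces A's O(n^2) all-pairs double loop by a single pass with a dict of
-- last-seen indices, tracking the minimal gap (asymptotically faster).

-- ===== PORT A =====
-- Faithful port of A's nested loops. Python's `repeatingSet` always holds
-- exactly one element (every pop() is immediately followed by add() on a
-- singleton), so set.pop() removing that single element (List.tail) is exact
-- here; numList[i]/numList[j] have in-range indices, so pyGetD _ _ 0 is exact.
def getRepeatingElement (numList : List Int) : List Int :=
  ((PySem.List.pyRange 0 (PySem.List.len numList) 1).foldl
    (fun (st : Int × List Int) i =>
      (PySem.List.pyRange (i + 1) (PySem.List.len numList) 1).foldl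
        (fun (st : Int × List Int) j =>
          if PySem.List.pyGetD numList i 0 = PySem.List.pyGetD numList j 0 then
            if j - i < st.1 then
              (j - i, PySem.Set.add st.2.tail (PySem.List.pyGetD numList i 0))
            else st
          else st) st)
    ((10000000 : Int), PySem.Set.ofList [(0 : Int)])).2

-- ===== PORT B =====
-- Port of Source B: one pass over enumerate(numList), dict of last-seen index.
def getRepeatingElement_alt (numList : List Int) : List Int :=
  let r := (PySem.List.enumerate numList 0).foldl
    (fun (st : (Int × Int) × PySem.Dict Int Int) jv =>
      let s := match st.2.get? jv.2 with
        | some i => if jv.1 - i < st.1.1 then (jv.1 - i, jv.2) else st.1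
        | none => st.1
      (s, st.2.insert jv.2 jv.1))
    (((10000000 : Int), (0 : Int)), PySem.Dict.empty)
  PySem.Set.ofList [r.1.2]

-- ===== PRECONDITION & SPEC =====
def Spec_getRepeatingElement (numList : List Int) (out : List Int) : Prop := out = getRepeatingElement_alt numList
instance (numList : List Int) (out : List Int) : Decidable (Spec_getRepeatingElement numList out) := by unfold Spec_getRepeatingElement; infer_instance

-- ===== CLAIM (what is proved, stated in full; the proofs are below) =====
def Claim_equal_getRepeatingElement : Prop := ∀ (numList : List Int), Dom_getRepeatingElement numList → Spec_getRepeatingElement numList (getRepeatingElement numList)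

-- ===== LEMMAS AND PROOFS =====

-- The common selection step: keep the (gap, value) entry with the strictly
-- smallest gap seen so far (first entry wins on ties).
def pvStep (s e : Int × Int) : Int × Int := if e.1 < s.1 then e else s

def pvInit : Int × Int := (10000000, 0)

-- A's candidate entries: row i lists (j - i, a[i]) for the j > i matching a[i].
def pvEnt (a : List Int) (i j : Int) : Option (Int × Int) :=
  if PySem.List.pyGetD a i 0 = PySem.List.pyGetD a j 0 then
    some (j - i, PySem.List.pyGetD a i 0) else none

def pvRow (a : List Int) (i : Int) : List (Int × Int) :=
  (PySem.List.pyRange (i + 1) (PySem.List.len a) 1).filterMap (pvEnt a i)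

def pvLA (a : List Int) : List (Int × Int) :=
  (PySem.List.pyRange 0 (PySem.List.len a) 1).flatMap (pvRow a)

-- last index of v in pref (B's dict content after processing pref)
def pvPrv (pref : List Int) (v : Int) : Option Nat :=
  (List.range pref.length).foldl (fun acc i => if pref.getD i 0 = v then some i else acc) none

-- B's candidate entry at position k: gap to the last previous occurrence.
def pvOpt (a : List Int) (k : Nat) : Option (Int × Int) :=
  (pvPrv (a.take k) (a.getD k 0)).map (fun i : Nat => ((k : Int) - (i : Int), a.getD k 0))

def pvLB (a : List Int) : List (Int × Int) :=
  (List.range a.length).filterMap (pvOpt a)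

-- generic selection lemmas --
theorem pvSel_noupdate (L : List (Int × Int)) (m b : Int)
    (h : ∀ e ∈ L, ¬ e.1 < m) : L.foldl pvStep (m, b) = (m, b) := by
  induction L with
  | nil => rfl
  | cons e L ih =>
    have he : ¬ e.1 < m := h e (by simp)
    simp only [List.foldl_cons, pvStep, if_neg he]
    exact ih (fun e' h' => h e' (by simp [h']))

theorem pvSel_min (L : List (Int × Int)) (g v : Int) :
    ∀ s : Int × Int, g < s.1 → (∀ e ∈ L, g ≤ e.1) →
    L.find? (fun e => decide (e.1 ≤ g)) = some (g, v) →
    L.foldl pvStep s = (g, v) := by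
  induction L with
  | nil => intro s _ _ h; simp at h
  | cons e L ih =>
    intro s hs hge hf
    rw [List.find?_cons] at hf
    by_cases hp : e.1 ≤ g
    · simp only [decide_eq_true hp] at hf
      have he : e = (g, v) := by
        rcases hf with hf; injection hf
      subst he
      simp only [List.foldl_cons, pvStep, if_pos hs]
      exact pvSel_noupdate L g v (fun e' h' => not_lt.mpr (hge e' (by simp [h'])))
    · simp only [decide_eq_false hp] at hf
      have hge' : ∀ e' ∈ L, g ≤ e'.1 := fun e' h' => hge e' (by simp [h'])
      simp only [List.foldl_cons, pvStep]
      split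
      · exact ih _ (lt_of_not_ge hp) hge' hf
      · exact ih _ hs hge' hf

theorem pvFoldl_rel {α β γ : Type} (R : α → β → Prop) (f : α → γ → α) (g : β → γ → β)
    (l : List γ) (a : α) (b : β) (hR : R a b)
    (hstep : ∀ a b c, R a b → R (f a c) (g b c)) :
    R (l.foldl f a) (l.foldl g b) := by
  induction l generalizing a b with
  | nil => exact hR
  | cons c l ih => exact ih _ _ (hstep a b c hR)
def pvStepE (a : List Int) (i : Int) (st : Int × Int) (j : Int) : Int × Int :=
  match pvEnt a i j with
  | some e => pvStep st e
  | none => st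

theorem pvFoldl_stepE (a : List Int) (i : Int) (l : List Int) (s : Int × Int) :
    l.foldl (pvStepE a i) s = (l.filterMap (pvEnt a i)).foldl pvStep s := by
  rw [List.foldl_filterMap]
  exact PySem.List.foldl_congr_mem l _ _ s (fun acc x _ => by
    cases h : pvEnt a i x <;> simp [pvStepE, h])

theorem pvA_eq (a : List Int) :
    getRepeatingElement a = [((pvLA a).foldl pvStep pvInit).2] := by
  have hrel := pvFoldl_rel (fun (x : Int × List Int) (y : Int × Int) => x.1 = y.1 ∧ x.2 = [y.2])
    (fun (st : Int × List Int) i =>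
      (PySem.List.pyRange (i + 1) (PySem.List.len a) 1).foldl
        (fun (st : Int × List Int) j =>
          if PySem.List.pyGetD a i 0 = PySem.List.pyGetD a j 0 then
            if j - i < st.1 then
              (j - i, PySem.Set.add st.2.tail (PySem.List.pyGetD a i 0))
            else st
          else st) st)
    (fun (st : Int × Int) i =>
      (PySem.List.pyRange (i + 1) (PySem.List.len a) 1).foldl
        (pvStepE a i) st)
    (PySem.List.pyRange 0 (PySem.List.len a) 1)
    ((10000000 : Int), PySem.Set.ofList [(0 : Int)]) ((10000000 : Int), (0 : Int))
    (by exact ⟨rfl, rfl⟩)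
    (by
      intro x y i hxy
      refine pvFoldl_rel (fun (x : Int × List Int) (y : Int × Int) => x.1 = y.1 ∧ x.2 = [y.2]) _ _ _ _ _ hxy ?_
      intro x y j hxy
      obtain ⟨h1, h2⟩ := hxy
      unfold pvStepE pvEnt pvStep
      by_cases hm : PySem.List.pyGetD a i 0 = PySem.List.pyGetD a j 0
      · simp only [if_pos hm]
        by_cases hlt : j - i < x.1
        · have hlt' : j - i < y.1 := h1 ▸ hlt
          simp only [if_pos hlt, if_pos hlt']
          simp [h2, PySem.Set.add]
        · have hlt' : ¬ j - i < y.1 := h1 ▸ hlt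
          simp only [if_neg hlt, if_neg hlt']
          exact ⟨h1, h2⟩
      · simp only [if_neg hm]
        exact ⟨h1, h2⟩)
  unfold getRepeatingElement pvLA pvInit
  rw [List.foldl_flatMap]
  simp only [pvRow, ← pvFoldl_stepE]
  exact hrel.2

theorem pvPrv_snoc (xs : List Int) (x v : Int) :
    pvPrv (xs ++ [x]) v = if x = v then some xs.length else pvPrv xs v := by
  unfold pvPrv
  have hlen : (xs ++ [x]).length = xs.length + 1 := by simp
  rw [hlen, List.range_succ, List.foldl_append]
  have hgd : (xs ++ [x]).getD xs.length 0 = x := by simp [List.getD]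
  have hpre : (List.range xs.length).foldl
      (fun acc i => if (xs ++ [x]).getD i 0 = v then some i else acc) none =
      (List.range xs.length).foldl
      (fun acc i => if xs.getD i 0 = v then some i else acc) none :=
    PySem.List.foldl_congr_mem _ _ _ _ (fun acc i hi => by
      rw [List.getD_append xs [x] 0 i (List.mem_range.mp hi)])
  simp only [List.foldl_cons, List.foldl_nil, hgd, hpre]

theorem pvOpt_snoc_lt (xs : List Int) (x : Int) (k : Nat) (hk : k < xs.length) :
    pvOpt (xs ++ [x]) k = pvOpt xs k := by
  unfold pvOpt
  rw [List.take_append_of_le_length (le_of_lt hk),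
      List.getD_append xs [x] 0 k hk]

theorem pvOpt_snoc_self (xs : List Int) (x : Int) :
    pvOpt (xs ++ [x]) xs.length =
      (pvPrv xs x).map (fun i => ((xs.length : Int) - (i : Int), x)) := by
  unfold pvOpt
  rw [List.take_append_of_le_length (le_refl _), List.take_length]
  simp [List.getD]
  cases pvPrv xs x <;> rfl

theorem pvLB_snoc (xs : List Int) (x : Int) :
    pvLB (xs ++ [x]) = pvLB xs ++
      ((pvPrv xs x).map (fun i => ((xs.length : Int) - (i : Int), x))).toList := by
  unfold pvLB
  have hlen : (xs ++ [x]).length = xs.length + 1 := by simp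
  rw [hlen, List.range_succ, List.filterMap_append]
  congr 1
  · exact List.filterMap_congr (fun k hk => pvOpt_snoc_lt xs x k (List.mem_range.mp hk))
  · rw [List.filterMap_cons]
    rw [pvOpt_snoc_self]
    cases pvPrv xs x <;> simp

-- B's fold, named for the proofs (definitionally the fold inside the port).
def pvBFold (a : List Int) : (Int × Int) × PySem.Dict Int Int :=
  (PySem.List.enumerate a 0).foldl
    (fun (st : (Int × Int) × PySem.Dict Int Int) jv =>
      let s := match st.2.get? jv.2 with
        | some i => if jv.1 - i < st.1.1 then (jv.1 - i, jv.2) else st.1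
        | none => st.1
      (s, st.2.insert jv.2 jv.1))
    (((10000000 : Int), (0 : Int)), PySem.Dict.empty)

theorem pvBFold_inv (a : List Int) :
    (pvBFold a).1 = (pvLB a).foldl pvStep pvInit ∧
    ∀ v, (pvBFold a).2.get? v = (pvPrv a v).map (fun i => (i : Int)) := by
  induction a using List.reverseRecOn with
  | nil => exact ⟨rfl, fun v => by simp [pvBFold, pvPrv, PySem.Dict.get?_empty]⟩
  | append_singleton xs x ih =>
    obtain ⟨ih1, ih2⟩ := ih
    have hfold : pvBFold (xs ++ [x]) =
        (let st := pvBFold xs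
         let s := match st.2.get? x with
           | some i => if (xs.length : Int) - i < st.1.1 then ((xs.length : Int) - i, x) else st.1
           | none => st.1
         (s, st.2.insert x (xs.length : Int))) := by
      unfold pvBFold
      rw [PySem.List.enumerate_append, List.foldl_append]
      simp [PySem.List.enumerate]
    constructor
    · rw [hfold]
      simp only []
      rw [pvLB_snoc, List.foldl_append, ← ih1]
      rw [ih2 x]
      cases hp : pvPrv xs x <;> simp [pvStep]
    · intro v
      rw [hfold]
      simp only []
      rw [pvPrv_snoc]
      by_cases hv : v = x
      · subst hv
        rw [PySem.Dict.get?_insert_self, if_pos rfl]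
        rfl
      · rw [PySem.Dict.get?_insert_of_ne _ _ hv, if_neg (fun h => hv h.symm), ih2 v]

theorem pvB_eq (a : List Int) :
    getRepeatingElement_alt a = [((pvLB a).foldl pvStep pvInit).2] := by
  have h : getRepeatingElement_alt a = PySem.Set.ofList [(pvBFold a).1.2] := rfl
  rw [h, (pvBFold_inv a).1]
  rfl

theorem pvPrv_nil (v : Int) : pvPrv [] v = none := rfl

theorem pvPrv_spec (xs : List Int) (v : Int) (i : Nat) (h : pvPrv xs v = some i) :
    i < xs.length ∧ xs.getD i 0 = v ∧
      ∀ i', i < i' → i' < xs.length → xs.getD i' 0 ≠ v := by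
  induction xs using List.reverseRecOn generalizing i with
  | nil => simp [pvPrv_nil] at h
  | append_singleton xs x ih =>
    rw [pvPrv_snoc] at h
    by_cases hx : x = v
    · rw [if_pos hx] at h
      injection h with h
      subst h
      refine ⟨by simp, by simp [List.getD, hx], ?_⟩
      intro i' h1 h2 _
      simp at h2
      omega
    · rw [if_neg hx] at h
      obtain ⟨h1, h2, h3⟩ := ih i h
      refine ⟨by simp; omega, ?_, ?_⟩
      · rw [List.getD_append xs [x] 0 i h1]
        exact h2
      · intro i' hi1 hi2
        simp at hi2
        by_cases hl : i' < xs.length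
        · rw [List.getD_append xs [x] 0 i' hl]
          exact h3 i' hi1 hl
        · have : i' = xs.length := by omega
          subst this
          simp [List.getD, hx]

theorem pvPrv_isSome (xs : List Int) (v : Int) (i : Nat)
    (hi : i < xs.length) (hv : xs.getD i 0 = v) : (pvPrv xs v).isSome := by
  induction xs using List.reverseRecOn generalizing i with
  | nil => simp at hi
  | append_singleton xs x ih =>
    rw [pvPrv_snoc]
    by_cases hx : x = v
    · simp [hx]
    · rw [if_neg hx]
      have hl : i < xs.length := by
        rcases Nat.lt_or_ge i xs.length with h | h
        · exact h
        · exfalso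
          have : i = xs.length := by simp at hi; omega
          subst this
          rw [List.getD_eq_getElem?_getD] at hv
          simp at hv
          exact hx hv
      exact ih i hl (by rw [← List.getD_append xs [x] 0 i hl]; exact hv)

theorem pvEnt_eq_some (a : List Int) (i j : Int) (e : Int × Int) :
    pvEnt a i j = some e ↔
      PySem.List.pyGetD a i 0 = PySem.List.pyGetD a j 0 ∧
        e = (j - i, PySem.List.pyGetD a i 0) := by
  unfold pvEnt
  split
  · next h => simp [h, eq_comm]
  · next h => simp [h]

theorem pvMem_LA (a : List Int) (e : Int × Int) :
    e ∈ pvLA a ↔ ∃ i j : Int, 0 ≤ i ∧ i < j ∧ j < (a.length : Int) ∧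
      pvEnt a i j = some e := by
  unfold pvLA pvRow
  simp only [List.mem_flatMap, List.mem_filterMap, PySem.List.mem_pyRange_one,
    PySem.List.len_eq]
  constructor
  · rintro ⟨i, ⟨hi0, hin⟩, j, ⟨hj1, hj2⟩, he⟩
    exact ⟨i, j, hi0, by omega, hj2, he⟩
  · rintro ⟨i, j, hi0, hij, hjn, he⟩
    exact ⟨i, ⟨hi0, by omega⟩, j, ⟨by omega, hjn⟩, he⟩

theorem pvMem_LB (a : List Int) (e : Int × Int) :
    e ∈ pvLB a ↔ ∃ k, k < a.length ∧ pvOpt a k = some e := by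
  unfold pvLB
  simp [List.mem_filterMap, List.mem_range]

theorem pvGetD_take (l : List Int) (k i : Nat) (h : i < k) :
    (l.take k).getD i 0 = l.getD i 0 := by
  simp [List.getD, h]

-- every B-entry is an A-entry
theorem pvLB_sub (a : List Int) (k : Nat) (e : Int × Int)
    (hk : k < a.length) (he : pvOpt a k = some e) :
    ∃ i j : Int, 0 ≤ i ∧ i < j ∧ j < (a.length : Int) ∧ pvEnt a i j = some e := by
  unfold pvOpt at he
  cases hp : pvPrv (a.take k) (a.getD k 0) with
  | none => rw [hp] at he; simp at he
  | some i0 =>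
    rw [hp] at he
    simp at he
    obtain ⟨h1, h2, _⟩ := pvPrv_spec _ _ _ hp
    have hikn : i0 < k := by
      simp at h1
      omega
    refine ⟨(i0 : Int), (k : Int), by positivity, by exact_mod_cast hikn, by exact_mod_cast hk, ?_⟩
    rw [pvEnt_eq_some]
    have hval : a.getD i0 0 = a.getD k 0 := by
      rw [← pvGetD_take a k i0 hikn]
      exact h2
    rw [PySem.List.pyGetD_natCast, PySem.List.pyGetD_natCast, hval]
    constructor
    · rfl
    · rw [← he]
      simp [List.getD]

-- every A-pair dominates some B-entry
theorem pvLA_ge (a : List Int) (i j : Int)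
    (hi0 : 0 ≤ i) (hij : i < j) (hjn : j < (a.length : Int))
    (hm : PySem.List.pyGetD a i 0 = PySem.List.pyGetD a j 0) :
    ∃ e' ∈ pvLB a, e'.1 ≤ j - i := by
  set k := j.toNat with hk
  set it := i.toNat with hit
  have hjk : (k : Int) = j := by omega
  have hiit : (it : Int) = i := by omega
  have hitk : it < k := by omega
  have hkn : k < a.length := by omega
  have hgd : (a.take k).getD it 0 = a.getD k 0 := by
    rw [pvGetD_take a k it hitk]
    have h1 : a.getD it 0 = PySem.List.pyGetD a i 0 := by
      rw [← hiit, PySem.List.pyGetD_natCast]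
    have h2 : a.getD k 0 = PySem.List.pyGetD a j 0 := by
      rw [← hjk, PySem.List.pyGetD_natCast]
    rw [h1, h2, hm]
  have hlen : it < (a.take k).length := by simp; omega
  have hsome := pvPrv_isSome (a.take k) (a.getD k 0) it hlen hgd
  cases hp : pvPrv (a.take k) (a.getD k 0) with
  | none => rw [hp] at hsome; simp at hsome
  | some i' =>
    obtain ⟨hl1, _, hl3⟩ := pvPrv_spec _ _ _ hp
    have hge : it ≤ i' := by
      by_contra hcon
      push Not at hcon
      exact hl3 it hcon hlen hgd
    refine ⟨((k : Int) - (i' : Int), a.getD k 0), ?_, ?_⟩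
    · rw [pvMem_LB]
      refine ⟨k, hkn, ?_⟩
      unfold pvOpt
      rw [hp]
      rfl
    · simp only
      omega

theorem pvFindSome?_range {E : Type} (F : Nat → Option E) (n k : Nat) (e : E)
    (hk : k < n) (he : F k = some e) (hlo : ∀ k' < k, F k' = none) :
    (List.range n).findSome? F = some e := by
  induction n with
  | zero => omega
  | succ m ih =>
    rw [List.range_succ, List.findSome?_append]
    rcases Nat.lt_or_ge k m with h | h
    · rw [ih h]
      rfl
    · have hkm : k = m := by omega
      subst hkm
      have hnone : (List.range k).findSome? F = none :=
        List.findSome?_eq_none_iff.mpr (fun x hx => hlo x (List.mem_range.mp hx))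
      rw [hnone]
      simp [he]

theorem pvFind?_range (p : Nat → Bool) (n k : Nat)
    (hk : k < n) (hp : p k = true) (hlo : ∀ k' < k, p k' = false) :
    (List.range n).find? p = some k := by
  induction n with
  | zero => omega
  | succ m ih =>
    rw [List.range_succ, List.find?_append]
    rcases Nat.lt_or_ge k m with h | h
    · rw [ih h]
      rfl
    · have hkm : k = m := by omega
      subst hkm
      have hnone : (List.range k).find? p = none :=
        List.find?_eq_none.mpr (fun x hx => by simp [hlo x (List.mem_range.mp hx)])
      rw [hnone]
      simp [hp]

theorem pvFindSome?_pyRange {E : Type} (F : Int → Option E) (lo hi j : Int) (e : E)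
    (h1 : lo ≤ j) (h2 : j < hi) (he : F j = some e)
    (hlo : ∀ x, lo ≤ x → x < j → F x = none) :
    (PySem.List.pyRange lo hi 1).findSome? F = some e := by
  rw [PySem.List.pyRange_one, List.findSome?_map]
  refine pvFindSome?_range (F ∘ fun k : Nat => lo + (k : Int)) ((hi - lo).toNat)
    (j - lo).toNat e (by omega) ?_ ?_
  · show F (lo + ((j - lo).toNat : Int)) = some e
    have : lo + ((j - lo).toNat : Int) = j := by omega
    rw [this, he]
  · intro k' hk'
    have hb : lo ≤ lo + (k' : Int) := by omega
    have hb2 : lo + (k' : Int) < j := by omega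
    exact hlo _ hb hb2

theorem pvFind?_pyRange (q : Int → Bool) (lo hi j : Int)
    (h1 : lo ≤ j) (h2 : j < hi) (hq : q j = true)
    (hlo : ∀ x, lo ≤ x → x < j → q x = false) :
    (PySem.List.pyRange lo hi 1).find? q = some j := by
  rw [PySem.List.pyRange_one, List.find?_map]
  have h : (List.range (hi - lo).toNat).find? (q ∘ fun k : Nat => lo + (k : Int)) =
      some (j - lo).toNat := by
    refine pvFind?_range (q ∘ fun k : Nat => lo + (k : Int)) ((hi - lo).toNat)
      (j - lo).toNat (by omega) ?_ ?_
    · show q (lo + ((j - lo).toNat : Int)) = true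
      have : lo + ((j - lo).toNat : Int) = j := by omega
      rw [this, hq]
    · intro k' hk'
      show q (lo + (k' : Int)) = false
      have hb : lo ≤ lo + (k' : Int) := by omega
      have hb2 : lo + (k' : Int) < j := by omega
      exact hlo _ hb hb2
  rw [h]
  simp
  omega

theorem pvLB_pos (a : List Int) (e : Int × Int) (he : e ∈ pvLB a) : 0 < e.1 := by
  obtain ⟨k, hk, hopt⟩ := (pvMem_LB a e).mp he
  obtain ⟨i, j, hi0, hij, hjn, hent⟩ := pvLB_sub a k e hk hopt
  obtain ⟨_, he2⟩ := (pvEnt_eq_some a i j e).mp hent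
  rw [he2]
  simp
  omega

theorem pvLA_entry (a : List Int) (e : Int × Int) (he : e ∈ pvLA a) :
    ∃ i j : Int, 0 ≤ i ∧ i < j ∧ j < (a.length : Int) ∧
      PySem.List.pyGetD a i 0 = PySem.List.pyGetD a j 0 ∧
      e = (j - i, PySem.List.pyGetD a i 0) := by
  obtain ⟨i, j, h1, h2, h3, h4⟩ := (pvMem_LA a e).mp he
  obtain ⟨h5, h6⟩ := (pvEnt_eq_some a i j e).mp h4
  exact ⟨i, j, h1, h2, h3, h5, h6⟩

theorem pvGeA (a : List Int) (g : Int) (hgeB : ∀ e ∈ pvLB a, g ≤ e.1) :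
    ∀ e ∈ pvLA a, g ≤ e.1 := by
  intro e he
  obtain ⟨i, j, h1, h2, h3, h4, h5⟩ := pvLA_entry a e he
  obtain ⟨e', he', hle⟩ := pvLA_ge a i j h1 h2 h3 h4
  calc g ≤ e'.1 := hgeB e' he'
    _ ≤ j - i := hle
    _ = e.1 := by rw [h5]

-- the first row hit of A and the first position hit of B carry the same value
theorem pvMain (a : List Int) :
    (pvLA a).foldl pvStep pvInit = (pvLB a).foldl pvStep pvInit := by
  by_cases hx : ∃ e ∈ pvLB a, e.1 < 10000000
  · obtain ⟨ex, hexm, hexlt⟩ := hx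
    cases hmin : ((pvLB a).map Prod.fst).min? with
    | none =>
      rw [List.min?_eq_none_iff, List.map_eq_nil_iff] at hmin
      rw [hmin] at hexm
      simp at hexm
    | some g =>
      obtain ⟨hgmem, hgle⟩ := List.min?_eq_some_iff.mp hmin
      have hgeB : ∀ e ∈ pvLB a, g ≤ e.1 := fun e he =>
        hgle e.1 (List.mem_map_of_mem he)
      obtain ⟨eB, heBm, heB1⟩ : ∃ eB ∈ pvLB a, eB.1 = g := by
        obtain ⟨e, he, h1⟩ := List.mem_map.mp hgmem
        exact ⟨e, he, h1⟩
      have hglt : g < 10000000 := lt_of_le_of_lt (hgeB ex hexm) hexlt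
      have hgpos : 0 < g := heB1 ▸ pvLB_pos a eB heBm
      have hgeA : ∀ e ∈ pvLA a, g ≤ e.1 := pvGeA a g hgeB
      -- least B hit j0
      obtain ⟨j0, hj0len, hj0any, hj0min⟩ : ∃ j0 : Nat, j0 < a.length ∧
          (pvOpt a j0).any (fun e => decide (e.1 ≤ g)) = true ∧
          ∀ k : Nat, k < j0 → ¬ (k < a.length ∧
            (pvOpt a k).any (fun e => decide (e.1 ≤ g)) = true) := by
        have hQBex : ∃ k : Nat, k < a.length ∧
            (pvOpt a k).any (fun e => decide (e.1 ≤ g)) = true := by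
          obtain ⟨k, hk, hopt⟩ := (pvMem_LB a eB).mp heBm
          refine ⟨k, hk, ?_⟩
          rw [hopt]
          simp [heB1]
        exact ⟨Nat.find hQBex, (Nat.find_spec hQBex).1, (Nat.find_spec hQBex).2,
          fun k hk => Nat.find_min hQBex hk⟩
      obtain ⟨e0, hopt0⟩ : ∃ e0, pvOpt a j0 = some e0 := by
        cases h : pvOpt a j0 with
        | none => rw [h] at hj0any; simp at hj0any
        | some e0 => exact ⟨e0, rfl⟩
      have hpe0' : e0.1 ≤ g := by
        rw [hopt0] at hj0any
        simpa using hj0any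
      have he0m : e0 ∈ pvLB a := (pvMem_LB a e0).mpr ⟨j0, hj0len, hopt0⟩
      have he0g : e0.1 = g := le_antisymm hpe0' (hgeB e0 he0m)
      obtain ⟨i1, hp1, he0eq⟩ : ∃ i1,
          pvPrv (a.take j0) (a.getD j0 0) = some i1 ∧
          e0 = ((j0 : Int) - (i1 : Int), a.getD j0 0) := by
        unfold pvOpt at hopt0
        cases hh : pvPrv (a.take j0) (a.getD j0 0) with
        | none => rw [hh] at hopt0; simp at hopt0
        | some i1 =>
          rw [hh] at hopt0
          simp at hopt0
          exact ⟨i1, rfl, hopt0.symm⟩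
      obtain ⟨hi1len, hi1val, hi1max⟩ := pvPrv_spec _ _ _ hp1
      have hi1lt : i1 < j0 := by
        rw [List.length_take] at hi1len
        omega
      have hgap1 : (j0 : Int) - (i1 : Int) = g := by
        rw [he0eq] at he0g; simpa using he0g
      have hi1j0 : a.getD i1 0 = a.getD j0 0 := by
        rw [← pvGetD_take a j0 i1 hi1lt]; exact hi1val
      -- A-side predicate and its least witness i0
      have hPAi1 : ((i1 : Int) + g < (a.length : Int)) ∧
          (pvEnt a (i1 : Int) ((i1 : Int) + g)).any (fun e => decide (e.1 ≤ g)) = true := by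
        have hcast : (i1 : Int) + g = (j0 : Int) := by omega
        refine ⟨by rw [hcast]; exact_mod_cast hj0len, ?_⟩
        rw [hcast]
        have hmatch : PySem.List.pyGetD a (i1 : Int) 0 =
            PySem.List.pyGetD a (j0 : Int) 0 := by
          rw [PySem.List.pyGetD_natCast, PySem.List.pyGetD_natCast]
          exact hi1j0
        unfold pvEnt
        rw [if_pos hmatch]
        simp
        omega
      obtain ⟨i0, hPA1, hPA2, hPAmin⟩ : ∃ i0 : Nat, ((i0 : Int) + g < (a.length : Int)) ∧
          (pvEnt a (i0 : Int) ((i0 : Int) + g)).any (fun e => decide (e.1 ≤ g)) = true ∧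
          ∀ k : Nat, k < i0 → ¬ (((k : Int) + g < (a.length : Int)) ∧
            (pvEnt a (k : Int) ((k : Int) + g)).any (fun e => decide (e.1 ≤ g)) = true) := by
        have hPAex : ∃ k : Nat, ((k : Int) + g < (a.length : Int)) ∧
            (pvEnt a (k : Int) ((k : Int) + g)).any (fun e => decide (e.1 ≤ g)) = true :=
          ⟨i1, hPAi1⟩
        exact ⟨Nat.find hPAex, (Nat.find_spec hPAex).1, (Nat.find_spec hPAex).2,
          fun k hk => Nat.find_min hPAex hk⟩
      have hi0i1 : i0 ≤ i1 := by
        by_contra hcon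
        exact hPAmin i1 (by omega) hPAi1
      have hm0 : PySem.List.pyGetD a (i0 : Int) 0 =
          PySem.List.pyGetD a ((i0 : Int) + g) 0 := by
        by_cases hmm : PySem.List.pyGetD a (i0 : Int) 0 =
            PySem.List.pyGetD a ((i0 : Int) + g) 0
        · exact hmm
        · unfold pvEnt at hPA2
          rw [if_neg hmm] at hPA2
          simp at hPA2
      have hentA : pvEnt a (i0 : Int) ((i0 : Int) + g) =
          some (g, PySem.List.pyGetD a (i0 : Int) 0) := by
        rw [pvEnt_eq_some]
        exact ⟨hm0, by simp⟩
      -- find? on the A side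
      have hfindA : (pvLA a).find? (fun e => decide (e.1 ≤ g)) =
          some (g, PySem.List.pyGetD a (i0 : Int) 0) := by
        unfold pvLA
        rw [List.find?_flatMap]
        refine pvFindSome?_pyRange (fun i => (pvRow a i).find? (fun e => decide (e.1 ≤ g)))
          0 (PySem.List.len a) (i0 : Int) _
          (by omega) (by rw [PySem.List.len_eq]; omega) ?_ ?_
        · simp only [pvRow]
          rw [List.find?_filterMap]
          have hr : (PySem.List.pyRange ((i0 : Int) + 1) (PySem.List.len a) 1).find?
              (fun j => (pvEnt a (i0 : Int) j).any (fun e => decide (e.1 ≤ g))) =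
              some ((i0 : Int) + g) := by
            refine pvFind?_pyRange _ _ _ _ (by omega)
              (by rw [PySem.List.len_eq]; omega) ?_ ?_
            · rw [hentA]
              simp
            · intro x hx1 hx2
              cases hent : pvEnt a (i0 : Int) x with
              | none => rfl
              | some e' =>
                obtain ⟨hm', he'⟩ := (pvEnt_eq_some a _ x e').mp hent
                have hmem : e' ∈ pvLA a := (pvMem_LA a e').mpr
                  ⟨(i0 : Int), x, by positivity, by omega, by omega, hent⟩
                have hge := hgeA e' hmem
                rw [he'] at hge
                simp at hge
                simp
                rw [he']
                simp
                omega
          rw [hr]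
          simp [hentA]
        · intro x hx0 hxlt
          rw [List.find?_eq_none]
          intro e he hpe
          obtain ⟨j, hj, hent⟩ := List.mem_filterMap.mp he
          rw [PySem.List.mem_pyRange_one] at hj
          rw [PySem.List.len_eq] at hj
          obtain ⟨hm', he'⟩ := (pvEnt_eq_some a x j e).mp hent
          have hmem : e ∈ pvLA a := (pvMem_LA a e).mpr
            ⟨x, j, hx0, by omega, by omega, hent⟩
          have hge := hgeA e hmem
          have hple : e.1 ≤ g := by simpa using hpe
          have hjeq : j = x + g := by
            rw [he'] at hge hple
            simp at hge hple
            omega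
          refine hPAmin x.toNat (by omega) ?_
          have hc : ((x.toNat : Nat) : Int) = x := by omega
          rw [hc, ← hjeq]
          exact ⟨by omega, by rw [hent]; simpa using hpe⟩
      -- find? on the B side
      have hfindB : (pvLB a).find? (fun e => decide (e.1 ≤ g)) = some e0 := by
        unfold pvLB
        rw [List.find?_filterMap]
        have hr : (List.range a.length).find?
            (fun k => (pvOpt a k).any (fun e => decide (e.1 ≤ g))) = some j0 := by
          refine pvFind?_range _ _ _ hj0len (by rw [hopt0]; simpa using hpe0') ?_
          intro k' hk'
          cases hopt' : pvOpt a k' with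
          | none => simp
          | some e' =>
            simp only [Option.any_some]
            by_contra hb
            have hb' : decide (e'.1 ≤ g) = true := by simpa using hb
            exact hj0min k' hk' ⟨by omega, by rw [hopt']; simpa using hb'⟩
        rw [hr]
        simp [hopt0]
      -- j0 = i0 + g, so the two winning values coincide
      have hij : j0 ≤ i0 + g.toNat := by
        by_contra hcon
        push Not at hcon
        refine hj0min (i0 + g.toNat) (by omega) ⟨by omega, ?_⟩
        have hkc : (((i0 + g.toNat : Nat)) : Int) = (i0 : Int) + g := by omega
        have hkl : i0 + g.toNat < a.length := by omega
        have hIk : i0 < i0 + g.toNat := by omega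
        have hvk : a.getD i0 0 = a.getD (i0 + g.toNat) 0 := by
          have h1 : a.getD i0 0 = PySem.List.pyGetD a (i0 : Int) 0 := by
            rw [PySem.List.pyGetD_natCast]
          have h2 : a.getD (i0 + g.toNat) 0 =
              PySem.List.pyGetD a (((i0 + g.toNat : Nat)) : Int) 0 := by
            rw [PySem.List.pyGetD_natCast]
          rw [h1, h2, hkc, hm0]
        have htk : (a.take (i0 + g.toNat)).getD i0 0 = a.getD (i0 + g.toNat) 0 := by
          rw [pvGetD_take a _ _ hIk, hvk]
        have hlen2 : i0 < (a.take (i0 + g.toNat)).length := by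
          rw [List.length_take]; omega
        have hsome := pvPrv_isSome (a.take (i0 + g.toNat))
          (a.getD (i0 + g.toNat) 0) _ hlen2 htk
        cases hpk : pvPrv (a.take (i0 + g.toNat)) (a.getD (i0 + g.toNat) 0) with
        | none => rw [hpk] at hsome; simp at hsome
        | some i2 =>
          obtain ⟨hl1, hl2, hl3⟩ := pvPrv_spec _ _ _ hpk
          have hi2ge : i0 ≤ i2 := by
            by_contra hcon2
            push Not at hcon2
            exact hl3 _ hcon2 hlen2 htk
          unfold pvOpt
          rw [hpk]
          simp
          omega
      have hj0eq : j0 = i0 + g.toNat := by omega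
      have hvals : PySem.List.pyGetD a (i0 : Int) 0 = a.getD j0 0 := by
        have h2 : a.getD j0 0 = PySem.List.pyGetD a (j0 : Int) 0 := by
          rw [PySem.List.pyGetD_natCast]
        have hkc : (j0 : Int) = (i0 : Int) + g := by omega
        rw [h2, hkc, hm0]
      have he0form : e0 = (g, a.getD j0 0) := by
        rw [he0eq, hgap1]
      have hglt' : g < pvInit.1 := hglt
      rw [pvSel_min (pvLA a) g _ pvInit hglt' hgeA hfindA,
          pvSel_min (pvLB a) g _ pvInit hglt' hgeB (by rw [hfindB, he0form])]
      rw [hvals]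
  · have hB : ∀ e ∈ pvLB a, ¬ e.1 < 10000000 := by
      intro e he hlt
      exact hx ⟨e, he, hlt⟩
    have hA : ∀ e ∈ pvLA a, ¬ e.1 < 10000000 := by
      intro e he hlt
      obtain ⟨i, j, h1, h2, h3, h4, h5⟩ := pvLA_entry a e he
      obtain ⟨e', he', hle⟩ := pvLA_ge a i j h1 h2 h3 h4
      refine hB e' he' ?_
      rw [h5] at hlt
      simp at hlt ⊢
      omega
    show (pvLA a).foldl pvStep (10000000, 0) = (pvLB a).foldl pvStep (10000000, 0)
    rw [pvSel_noupdate _ _ _ hA, pvSel_noupdate _ _ _ hB]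


-- ===== VERDICT (by name: the statement is the Claim_ definition above) =====
theorem getRepeatingElement_spec : Claim_equal_getRepeatingElement := by
  intro a _
  show getRepeatingElement a = getRepeatingElement_alt a
  rw [pvA_eq, pvB_eq, pvMain]
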